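-- pv_equiv track=rewrite | github.com/tmacychen/octos-test | test_run.py | get_tests_to_rerun
-- ===== SOURCE A (Python) =====
-- from typing import Dict, List, Optional, Tuple
--
-- def get_tests_to_rerun(failed_tests: List[str], all_tests: List[str]) -> List[str]:
--     """Get tests to re-run from the first failure onwards.
--
--     Args:
--         failed_tests: List of failed test names
--         all_tests: List of all tests in execution order
--
--     Returns:
--         Tests from the first failed test onwards (in original order)
--     """
--     if not failed_tests or not all_tests:
--         return []
--
--     failed_set = set(failed_tests)
--
--     # Find the first failed test's index in the full order
--     for i, test in enumerate(all_tests):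
--         if test in failed_set:
--             return all_tests[i:]
--
--     return []
-- ===== SOURCE B (Python) =====
-- def get_tests_to_rerun(failed_tests, all_tests):
--     """Get tests to re-run from the first failure onwards.
--
--     Builds a first-occurrence index of all_tests, then takes the minimum
--     index among failed tests that appear in it.
--     """
--     if not failed_tests or not all_tests:
--         return []
--
--     first_index = {}
--     for i, test in enumerate(all_tests):
--         if test not in first_index:
--             first_index[test] = i
--
--     candidates = [first_index[t] for t in failed_tests if t in first_index]
--     if not candidates:
--         return []
--     return all_tests[min(candidates):]
-- ===== Notes on version B (the rewrite author's own statement) =====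
-- stated objective: alternative
-- what changed: Replaces A's short-circuit scan of all_tests against a failed-name set by building a first-occurrence index dict over all_tests once, then taking the minimum index over the failed tests found in it and slicing there.
import Mathlib
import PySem

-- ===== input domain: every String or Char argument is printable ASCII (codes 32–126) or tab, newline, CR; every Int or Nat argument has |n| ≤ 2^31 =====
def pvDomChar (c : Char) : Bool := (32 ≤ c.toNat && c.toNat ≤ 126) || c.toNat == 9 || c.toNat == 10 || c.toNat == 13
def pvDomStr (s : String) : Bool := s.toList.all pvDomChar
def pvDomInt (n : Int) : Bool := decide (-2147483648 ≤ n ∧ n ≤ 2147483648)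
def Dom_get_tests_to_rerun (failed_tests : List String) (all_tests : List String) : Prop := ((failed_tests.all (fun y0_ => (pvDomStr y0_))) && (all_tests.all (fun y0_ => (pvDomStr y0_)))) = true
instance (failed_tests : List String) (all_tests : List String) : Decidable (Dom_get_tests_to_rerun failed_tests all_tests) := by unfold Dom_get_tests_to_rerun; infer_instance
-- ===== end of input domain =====

-- B replaces A's short-circuit scan by a first-occurrence index dict plus a minimum over failed indices (alternative decomposition, same cost).


-- ===== PORT A =====
-- the 'for i, test in enumerate(all_tests): if test in failed_set: return all_tests[i:]' loop
def pvALoop (failed_set : PySem.Set String) (orig : List String) : List (Int × String) → List String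
  | [] => []
  | p :: rest =>
      if PySem.Set.contains failed_set p.2 then PySem.List.slice orig (some p.1) none
      else pvALoop failed_set orig rest

def get_tests_to_rerun (failed_tests : List String) (all_tests : List String) : List String :=
  if failed_tests = [] ∨ all_tests = [] then []
  else
    pvALoop (PySem.Set.ofList failed_tests) all_tests (PySem.List.enumerate all_tests 0)

-- ===== PORT B =====
def get_tests_to_rerun_alt (failed_tests : List String) (all_tests : List String) : List String :=
  if failed_tests = [] ∨ all_tests = [] then []
  else
    let first_index : PySem.Dict String Int :=
      (PySem.List.enumerate all_tests 0).foldl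
        (fun d p => if d.contains p.2 then d else d.insert p.2 p.1) PySem.Dict.empty
    let candidates : List Int := failed_tests.filterMap (fun t => first_index.get? t)
    match PySem.List.min? candidates (fun x => x) with
    | none => []
    | some m => PySem.List.slice all_tests (some m) none

-- ===== PRECONDITION & SPEC =====
def Spec_get_tests_to_rerun (failed_tests : List String) (all_tests : List String) (out : List String) : Prop := out = get_tests_to_rerun_alt failed_tests all_tests
instance (failed_tests : List String) (all_tests : List String) (out : List String) : Decidable (Spec_get_tests_to_rerun failed_tests all_tests out) := by unfold Spec_get_tests_to_rerun; infer_instance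

-- ===== CLAIM (what is proved, stated in full; the proofs are below) =====
def Claim_equal_get_tests_to_rerun : Prop := ∀ (failed_tests : List String) (all_tests : List String), Dom_get_tests_to_rerun failed_tests all_tests → Spec_get_tests_to_rerun failed_tests all_tests (get_tests_to_rerun failed_tests all_tests)

-- ===== LEMMAS AND PROOFS =====

-- first index j of xs with xs[j] in F (proof-side characterisation of A's loop)
def firstHit (F : PySem.Set String) : List String → Option Nat
  | [] => none
  | x :: xs => if PySem.Set.contains F x then some 0 else (firstHit F xs).map (· + 1)

theorem pvALoop_eq_firstHit (F : PySem.Set String) (orig : List String) :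
    ∀ (xs : List String) (s : Nat),
      pvALoop F orig (PySem.List.enumerate xs (s : Int)) =
        match firstHit F xs with
        | none => []
        | some j => orig.drop (s + j) := by
  intro xs
  induction xs with
  | nil => intro s; simp [PySem.List.enumerate_nil, pvALoop, firstHit]
  | cons x xs ih =>
      intro s
      rw [PySem.List.enumerate_cons]
      by_cases h : x ∈ F
      · simp [pvALoop, firstHit, h, PySem.List.slice_from_natCast]
      · have hc : PySem.Set.contains F x = false := by
          rw [Bool.eq_false_iff]; intro hb; exact h ((PySem.Set.contains_iff _ _).mp hb)
        have : ((s : Int) + 1) = ((s + 1 : Nat) : Int) := by push_cast; ring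
        rw [pvALoop, if_neg (by simp only [PySem.Set.contains_iff]; exact h : ¬ F.contains ((s : Int), x).2 = true), this, ih (s + 1)]
        simp only [firstHit, hc, if_neg Bool.false_ne_true]
        cases firstHit F xs with
        | none => simp
        | some j => simp [Nat.add_assoc, Nat.add_comm 1 j]

theorem firstHit_get (F : PySem.Set String) (xs : List String) (j : Nat)
    (h : firstHit F xs = some j) :
    ∃ hj : j < xs.length, xs[j] ∈ F := by
  induction xs generalizing j with
  | nil => simp [firstHit] at h
  | cons x xs ih =>
      simp only [firstHit] at h
      by_cases hx : PySem.Set.contains F x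
      · rw [if_pos hx] at h
        cases h
        exact ⟨by simp, (PySem.Set.contains_iff _ _).mp hx⟩
      · rw [if_neg hx] at h
        cases hj' : firstHit F xs with
        | none => rw [hj'] at h; simp at h
        | some j' =>
            rw [hj'] at h
            simp at h
            obtain ⟨hlt, hc⟩ := ih j' hj'
            exact ⟨by simp; omega, by simpa [← h] using hc⟩

theorem firstHit_min (F : PySem.Set String) (xs : List String) (j : Nat)
    (h : firstHit F xs = some j) :
    ∀ (i : Nat) (hi : i < xs.length), xs[i] ∈ F → j ≤ i := by
  induction xs generalizing j with
  | nil => simp [firstHit] at h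
  | cons x xs ih =>
      simp only [firstHit] at h
      by_cases hx : PySem.Set.contains F x
      · rw [if_pos hx] at h; cases h; omega
      · rw [if_neg hx] at h
        cases hj' : firstHit F xs with
        | none => rw [hj'] at h; simp at h
        | some j' =>
            rw [hj'] at h
            simp at h
            intro i hi hc
            cases i with
            | zero => exact absurd ((PySem.Set.contains_iff _ _).mpr (by simpa using hc)) hx
            | succ i =>
                have := ih j' hj' i (by simpa using Nat.lt_of_succ_lt_succ hi) (by simpa using hc)
                omega

theorem firstHit_eq_none_iff (F : PySem.Set String) (xs : List String) :
    firstHit F xs = none ↔ ∀ x ∈ xs, x ∉ F := by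
  induction xs with
  | nil => simp [firstHit]
  | cons x xs ih =>
      simp only [firstHit]
      by_cases hx : PySem.Set.contains F x
      · simp [hx, (PySem.Set.contains_iff _ _).mp hx]
      · have hx' : x ∉ F := fun hm => hx ((PySem.Set.contains_iff _ _).mpr hm)
        simp [Bool.eq_false_iff.mpr hx, ih, hx']

-- the first-occurrence dict fold computes index?
theorem dict_fold_get? (t : String) :
    ∀ (xs : List String) (s : Nat) (d : PySem.Dict String Int),
      ((PySem.List.enumerate xs (s : Int)).foldl
          (fun d p => if d.contains p.2 then d else d.insert p.2 p.1) d).get? t =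
        match d.get? t with
        | some v => some v
        | none => (PySem.List.index? xs t).map (fun k => ((s + k : Nat) : Int)) := by
  intro xs
  induction xs with
  | nil =>
      intro s d
      simp [PySem.List.enumerate_nil]
      cases d.get? t <;> simp [PySem.List.index?]
  | cons x xs ih =>
      intro s d
      rw [PySem.List.enumerate_cons]
      have hcast : ((s : Int) + 1) = ((s + 1 : Nat) : Int) := by push_cast; ring
      simp only [List.foldl_cons, hcast]
      rw [ih (s + 1)]
      by_cases hc : d.contains x
      · simp only [if_pos hc]
        cases hg : d.get? t with
        | some v => rfl
        | none =>
            have hne : x ≠ t := by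
              intro he; subst he
              rw [PySem.Dict.contains_eq_isSome_get?, hg] at hc; simp at hc
            rw [PySem.List.index?_cons_of_ne xs hne]
            cases PySem.List.index? xs t <;> simp <;> omega
      · simp only [if_neg hc]
        by_cases he : t = x
        · subst he
          have : ((PySem.Dict.insert d t ((s : Nat) : Int)).get? t) = some ((s : Nat) : Int) :=
            PySem.Dict.get?_insert_self d t ((s : Nat) : Int)
          rw [this]
          have hg : d.get? t = none := by
            rw [PySem.Dict.get?_eq_none_iff_contains]; simpa using hc
          rw [hg, PySem.List.index?_cons_self]
          simp
        · rw [PySem.Dict.get?_insert_of_ne d ((s : Nat) : Int) he]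
          cases hg : d.get? t with
          | some v => rfl
          | none =>
              rw [PySem.List.index?_cons_of_ne xs (fun h => he h.symm)]
              cases PySem.List.index? xs t <;> simp <;> omega

theorem mem_filterMap_get? (failed all : List String) (m : Int)
    (hm : m ∈ failed.filterMap (fun t =>
        ((PySem.List.index? all t).map (fun k => ((k : Nat) : Int))))) :
    ∃ (t : String) (k : Nat), t ∈ failed ∧ PySem.List.index? all t = some k ∧ m = (k : Int) := by
  rcases List.mem_filterMap.mp hm with ⟨t, ht, hv⟩
  cases hk : PySem.List.index? all t with
  | none => rw [hk] at hv; simp at hv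
  | some k =>
      rw [hk] at hv; simp at hv
      exact ⟨t, k, ht, hk, hv.symm⟩

theorem index?_le_of_getElem (all : List String) (j : Nat) (hj : j < all.length)
    (k : Nat) (hk : PySem.List.index? all all[j] = some k) : k ≤ j := by
  obtain ⟨hklt, _, hmin⟩ := PySem.List.getElem_of_index?_eq_some hk
  by_contra hgt
  exact hmin j (by omega) rfl

-- ===== VERDICT (by name: the statement is the Claim_ definition above) =====
theorem get_tests_to_rerun_spec : Claim_equal_get_tests_to_rerun := by
  unfold Claim_equal_get_tests_to_rerun Spec_get_tests_to_rerun
  intro failed all _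
  unfold get_tests_to_rerun get_tests_to_rerun_alt
  by_cases hemp : failed = [] ∨ all = []
  · simp [hemp]
  · simp only [if_neg hemp]
    have hA := pvALoop_eq_firstHit (PySem.Set.ofList failed) all all 0
    simp only [Nat.cast_zero] at hA
    rw [hA]
    have hcand : failed.filterMap
        (fun t => ((PySem.List.enumerate all ((0 : Nat) : Int)).foldl
          (fun d p => if d.contains p.2 then d else d.insert p.2 p.1) PySem.Dict.empty).get? t) =
        failed.filterMap (fun t =>
          ((PySem.List.index? all t).map (fun k => ((k : Nat) : Int)))) := by
      apply List.filterMap_congr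
      intro t _
      rw [dict_fold_get? t all 0 PySem.Dict.empty]
      simp [PySem.Dict.get?, PySem.Dict.empty]
    simp only [Nat.cast_zero] at hcand
    rw [hcand]
    set cands := failed.filterMap (fun t =>
      ((PySem.List.index? all t).map (fun k => ((k : Nat) : Int)))) with hcands
    cases hfh : firstHit (PySem.Set.ofList failed) all with
    | none =>
        have hnone : ∀ x ∈ all, x ∉ PySem.Set.ofList failed :=
          (firstHit_eq_none_iff _ _).mp hfh
        have : cands = [] := by
          rw [hcands, List.filterMap_eq_nil_iff]
          intro t ht
          cases hk : PySem.List.index? all t with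
          | none => simp
          | some k =>
              obtain ⟨hklt, hget, _⟩ := PySem.List.getElem_of_index?_eq_some hk
              have := hnone all[k] (List.getElem_mem hklt)
              rw [hget] at this
              exact absurd ((PySem.Set.mem_ofList _ _).mpr ht) this
        rw [this]
        simp [PySem.List.min?]
    | some j =>
        obtain ⟨hjlt, hjc⟩ := firstHit_get _ _ _ hfh
        have hjmem : all[j] ∈ failed := (PySem.Set.mem_ofList _ _).mp hjc
        -- a candidate ≤ j exists
        obtain ⟨k, hk⟩ : ∃ k, PySem.List.index? all all[j] = some k := by
          cases hk : PySem.List.index? all all[j] with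
          | none =>
              rw [PySem.List.index?_eq_none_iff] at hk
              exact absurd (List.getElem_mem hjlt) hk
          | some k => exact ⟨k, rfl⟩
        have hkj : k ≤ j := index?_le_of_getElem all j hjlt k hk
        have hkmem : ((k : Nat) : Int) ∈ cands := by
          rw [hcands]
          exact List.mem_filterMap.mpr ⟨all[j], hjmem, by rw [hk]; rfl⟩
        cases hmin : PySem.List.min? cands (fun x => x) with
        | none =>
            rw [PySem.List.min?_eq_none_iff] at hmin
            rw [hmin] at hkmem
            simp at hkmem
        | some m =>
            have hmmem := PySem.List.min?_mem hmin
            have hmle : m ≤ ((k : Nat) : Int) := PySem.List.min?_isMin hmin _ hkmem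
            obtain ⟨t, k', ht, hk', hm⟩ := mem_filterMap_get? failed all m hmmem
            have hjle : j ≤ k' := by
              obtain ⟨hk'lt, hget, _⟩ := PySem.List.getElem_of_index?_eq_some hk'
              apply firstHit_min _ _ _ hfh k' hk'lt
              rw [hget]
              exact (PySem.Set.mem_ofList _ _).mpr ht
            have hmj : m = ((j : Nat) : Int) := by
              rw [hm] at hmle ⊢
              have : (k' : Int) ≤ (k : Int) := by exact_mod_cast hmle
              have : k' = j := by omega
              simp [this]
            rw [hmj]
            simp [PySem.List.slice_from_natCast]
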